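-- pv_equiv track=rewrite | github.com/prgrjm/riotgames | main.py | check
-- ===== SOURCE A (Python) =====
-- def check(count):
--     answer = set()
--     for i in count:
--         for j in count:
--             if i != j:
--                 answer.add(i + j)
--     if len(answer) * 2 == len(count) * (len(count) - 1):
--         return True
--     else:
--         return False
-- ===== SOURCE B (Python) =====
-- def check(count):
--     items = sorted(count)
--     for a, b in zip(items, items[1:]):
--         if a == b:
--             return False
--     sums = []
--     for i in range(len(items)):
--         for j in range(i + 1, len(items)):
--             sums.append(items[i] + items[j])
--     sums.sort()
--     for a, b in zip(sums, sums[1:]):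
--         if a == b:
--             return False
--     return True
-- ===== Notes on version B (the rewrite author's own statement) =====
-- stated objective: alternative
-- what changed: B replaces A's hash-set of all ordered pairwise sums plus the cardinality formula by a sort-then-scan algorithm with no sets at all: it sorts the elements and rejects early on an adjacent duplicate, then builds the list of i<j sums, sorts it, and rejects iff two adjacent sorted sums are equal.
import Mathlib
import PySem

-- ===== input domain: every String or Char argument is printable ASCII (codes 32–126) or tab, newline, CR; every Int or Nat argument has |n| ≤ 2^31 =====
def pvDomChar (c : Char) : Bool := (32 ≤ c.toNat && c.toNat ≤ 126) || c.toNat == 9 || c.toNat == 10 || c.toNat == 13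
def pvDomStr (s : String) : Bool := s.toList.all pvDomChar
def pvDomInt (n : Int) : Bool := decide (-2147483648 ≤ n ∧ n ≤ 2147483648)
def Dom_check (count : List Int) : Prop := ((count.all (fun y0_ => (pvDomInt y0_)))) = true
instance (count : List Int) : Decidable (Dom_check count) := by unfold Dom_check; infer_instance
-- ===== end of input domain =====

-- B: sort-then-scan with no sets — sort the elements and reject on an adjacent duplicate,
-- then sort the list of i<j sums and reject iff two adjacent sorted sums are equal
-- (alternative algorithm, same result on every input).

-- ===== PORT A =====
def check (count : List Int) : Bool :=
  let answer : PySem.Set Int :=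
    count.foldl (fun answer i =>
      count.foldl (fun answer j =>
        if i ≠ j then PySem.Set.add answer (i + j) else answer) answer)
      PySem.Set.empty
  decide ((answer.length : Int) * 2 = (count.length : Int) * ((count.length : Int) - 1))

-- ===== PORT B =====
def check_alt (count : List Int) : Bool :=
  let items := PySem.List.sorted count (fun x => x) false
  -- 'for a, b in zip(items, items[1:]): if a == b: return False'
  if (items.zip (PySem.List.slice items (some 1) none)).any (fun p => p.1 == p.2) then false
  else
    let sums : List Int :=
      (PySem.List.pyRange 0 (items.length : Int) 1).foldl (fun sums i =>
        (PySem.List.pyRange (i + 1) (items.length : Int) 1).foldl (fun sums j =>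
          sums ++ [PySem.List.pyGetD items i 0 + PySem.List.pyGetD items j 0]) sums) []
    let sums := PySem.List.sorted sums (fun x => x) false
    if (sums.zip (PySem.List.slice sums (some 1) none)).any (fun p => p.1 == p.2) then false
    else true

-- ===== PRECONDITION & SPEC =====
def Spec_check (count : List Int) (out : Bool) : Prop := out = check_alt count
instance (count : List Int) (out : Bool) : Decidable (Spec_check count out) := by unfold Spec_check; infer_instance

-- ===== CLAIM =====
def Claim_equal_check : Prop := ∀ (count : List Int), Dom_check count → Spec_check count (check count)

-- ===== LEMMAS AND PROOFS =====

-- A's set, named for the proofs (definitionally the one the port builds).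
def ASet (count : List Int) : PySem.Set Int :=
  count.foldl (fun answer i =>
    count.foldl (fun answer j =>
      if i ≠ j then PySem.Set.add answer (i + j) else answer) answer)
    PySem.Set.empty

theorem check_eq_ASet (count : List Int) :
    check count = decide (((ASet count).length : Int) * 2 = (count.length : Int) * ((count.length : Int) - 1)) := rfl

theorem mem_foldlSet {β : Type} (h : PySem.Set Int → β → PySem.Set Int) (Q : β → Int → Prop)
    (hm : ∀ acc b x, x ∈ h acc b ↔ x ∈ acc ∨ Q b x) :
    ∀ (l : List β) (acc : PySem.Set Int) (x : Int),
      x ∈ l.foldl h acc ↔ x ∈ acc ∨ ∃ b ∈ l, Q b x := by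
  intro l
  induction l with
  | nil => simp
  | cons b l ih =>
    intro acc x
    simp only [List.foldl_cons, ih, hm, List.mem_cons]
    constructor
    · rintro ((h | h) | ⟨c, hc, hq⟩)
      · exact Or.inl h
      · exact Or.inr ⟨b, Or.inl rfl, h⟩
      · exact Or.inr ⟨c, Or.inr hc, hq⟩
    · rintro (h | ⟨c, (rfl | hc), hq⟩)
      · exact Or.inl (Or.inl h)
      · exact Or.inl (Or.inr hq)
      · exact Or.inr ⟨c, hc, hq⟩

theorem nodup_foldlSet {β : Type} (h : PySem.Set Int → β → PySem.Set Int)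
    (hn : ∀ acc b, acc.Nodup → (h acc b).Nodup) :
    ∀ (l : List β) (acc : PySem.Set Int), acc.Nodup → (l.foldl h acc).Nodup := by
  intro l
  induction l with
  | nil => intro acc hacc; exact hacc
  | cons b l ih => intro acc hacc; exact ih _ (hn _ _ hacc)

theorem mem_ASet (count : List Int) (x : Int) :
    x ∈ ASet count ↔ ∃ i ∈ count, ∃ j ∈ count, i ≠ j ∧ x = i + j := by
  unfold ASet
  rw [mem_foldlSet _ (fun i x => ∃ j ∈ count, i ≠ j ∧ x = i + j)]
  · simp [PySem.Set.empty]
  · intro acc i x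
    rw [mem_foldlSet _ (fun j x => i ≠ j ∧ x = i + j)]
    intro acc j x
    split_ifs with hij
    · simp only [PySem.Set.mem_add]
      tauto
    · tauto

theorem nodup_ASet (count : List Int) : (ASet count).Nodup := by
  unfold ASet
  apply nodup_foldlSet
  · intro acc i hacc
    apply nodup_foldlSet
    · intro acc j hacc
      split_ifs with hij
      · exact PySem.Set.nodup_add _ _ hacc
      · exact hacc
    · exact hacc
  · exact List.nodup_nil

-- B's sums list, in clean flatMap form.
def sumsOf (l : List Int) : List Int :=
  (List.range l.length).flatMap (fun i => (l.drop (i + 1)).map (fun y => l.getD i 0 + y))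

theorem sums_fold_eq (l : List Int) :
    (PySem.List.pyRange 0 (l.length : Int) 1).foldl (fun sums i =>
        (PySem.List.pyRange (i + 1) (l.length : Int) 1).foldl (fun sums j =>
          sums ++ [PySem.List.pyGetD l i 0 + PySem.List.pyGetD l j 0]) sums) []
      = sumsOf l := by
  rw [PySem.List.foldl_congr_mem _ _
      (fun sums i => sums ++ (l.drop (i + 1).toNat).map (fun y => PySem.List.pyGetD l i 0 + y)) _ ?_]
  · rw [PySem.List.foldl_append_eq_flatMap, PySem.List.pyRange_zero_natCast, List.flatMap_map]
    simp only [List.nil_append, sumsOf]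
    apply List.flatMap_congr
    intro k hk
    have h1 : ((k : Int) + 1).toNat = k + 1 := by omega
    rw [h1, PySem.List.pyGetD_natCast]
  · intro acc i hi
    have h0 : (0:Int) ≤ i := by
      have := (PySem.List.mem_pyRange_one).mp hi
      omega
    rw [PySem.List.foldl_pyRange_pyGetD' l 0
        (fun acc y => acc ++ [PySem.List.pyGetD l i 0 + y]) acc (by omega : (0:Int) ≤ i + 1),
        PySem.List.foldl_append_singleton_eq_map]

theorem length_sumsOf_mul_two (l : List Int) :
    (sumsOf l).length * 2 = l.length * (l.length - 1) := by
  have h : (sumsOf l).length = ∑ i ∈ Finset.range l.length, (l.length - 1 - i) := by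
    rw [sumsOf, List.length_flatMap]
    have h2 : (List.range l.length).map
        (fun a => ((l.drop (a + 1)).map (fun y => l.getD a 0 + y)).length)
        = (List.range l.length).map (fun i => l.length - 1 - i) := by
      apply List.map_congr_left
      intro a ha
      simp only [List.length_map, List.length_drop]
      omega
    rw [h2]
    exact Nat.add_zero _
  rw [h, Finset.sum_range_reflect (fun j => j) l.length]
  exact Finset.sum_range_id_mul_two l.length

theorem mem_sumsOf (l : List Int) (x : Int) :
    x ∈ sumsOf l ↔ ∃ (k : Nat), ∃ _ : k < l.length, ∃ y ∈ l.drop (k + 1), x = l[k] + y := by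
  simp only [sumsOf, List.mem_flatMap, List.mem_range, List.mem_map]
  constructor
  · rintro ⟨k, hk, y, hy, rfl⟩
    exact ⟨k, hk, y, hy, by rw [List.getD_eq_getElem _ _ hk]⟩
  · rintro ⟨k, hk, y, hy, rfl⟩
    exact ⟨k, hk, y, hy, by rw [List.getD_eq_getElem _ _ hk]⟩

-- the adjacent scan over zip(l, l[1:]) finds nothing iff adjacent entries are pairwise ≠
theorem any_zip_eq_false_iff (l : List Int) :
    ((l.zip l.tail).any (fun p => p.1 == p.2) = false) ↔ l.IsChain (· ≠ ·) := by
  induction l with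
  | nil => simp
  | cons a t ih =>
    cases t with
    | nil => simp
    | cons b t' =>
      simp only [List.tail_cons, List.zip_cons_cons, List.any_cons, Bool.or_eq_false_iff,
        beq_eq_false_iff_ne, List.isChain_cons_cons] at *
      rw [← ih]

theorem isChain_lt_of_le_ne (l : List Int) :
    l.IsChain (· ≤ ·) → l.IsChain (· ≠ ·) → l.IsChain (· < ·) := by
  induction l with
  | nil => simp
  | cons a t ih =>
    cases t with
    | nil => simp
    | cons b t' =>
      simp only [List.isChain_cons_cons]
      rintro ⟨h1, h2⟩ ⟨h3, h4⟩
      exact ⟨lt_of_le_of_ne h1 h3, ih h2 h4⟩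

-- on a ≤-sorted list, adjacent-distinct is exactly Nodup
theorem chain_ne_iff_nodup (l : List Int) (h : l.Pairwise (· ≤ ·)) :
    l.IsChain (· ≠ ·) ↔ l.Nodup := by
  constructor
  · intro hc
    have hlt : l.IsChain (· < ·) := isChain_lt_of_le_ne l h.isChain hc
    exact ((List.isChain_iff_pairwise).mp hlt).imp ne_of_lt
  · intro hn
    exact hn.isChain

-- under Nodup, A's ordered-pair characterisation coincides with the triangular one
theorem pairs_iff (count : List Int) (hnd : count.Nodup) (x : Int) :
    (∃ i ∈ count, ∃ j ∈ count, i ≠ j ∧ x = i + j) ↔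
    (∃ (k : Nat), ∃ _ : k < count.length, ∃ y ∈ count.drop (k + 1), x = count[k] + y) := by
  constructor
  · rintro ⟨i, hi, j, hj, hij, rfl⟩
    obtain ⟨a, ha, rfl⟩ := List.getElem_of_mem hi
    obtain ⟨b, hb, rfl⟩ := List.getElem_of_mem hj
    have hab : a ≠ b := fun h => hij (by simp [h])
    rcases Nat.lt_or_ge a b with h | h
    · refine ⟨a, ha, count[b], ?_, rfl⟩
      have hb' : b - (a + 1) < (count.drop (a + 1)).length := by
        simp [List.length_drop]; omega
      have : (count.drop (a + 1))[b - (a + 1)] = count[b] := by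
        rw [List.getElem_drop]; congr 1; omega
      rw [← this]; exact List.getElem_mem _
    · have hba : b < a := by omega
      refine ⟨b, hb, count[a], ?_, by ring⟩
      have ha' : a - (b + 1) < (count.drop (b + 1)).length := by
        simp [List.length_drop]; omega
      have : (count.drop (b + 1))[a - (b + 1)] = count[a] := by
        rw [List.getElem_drop]; congr 1; omega
      rw [← this]; exact List.getElem_mem _
  · rintro ⟨k, hk, y, hy, rfl⟩
    obtain ⟨m, hm, rfl⟩ := List.getElem_of_mem hy
    rw [List.getElem_drop]
    have hm' : k + 1 + m < count.length := by simp [List.length_drop] at hm; omega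
    refine ⟨count[k], List.getElem_mem _, count[k + 1 + m], List.getElem_mem _, ?_, rfl⟩
    intro h
    have := (List.Nodup.getElem_inj_iff hnd).mp h
    omega

-- cardinality bound when duplicates exist: 2·|ASet| ≤ m·(m−1) with m = #distinct values
theorem ASet_card_bound (count : List Int) :
    2 * (ASet count).length ≤ count.toFinset.card * (count.toFinset.card - 1) := by
  classical
  set F := count.toFinset with hF
  set S : Finset (Int × Int) := F.offDiag.filter (fun p => p.1 < p.2) with hS
  set S' : Finset (Int × Int) := F.offDiag.filter (fun p => p.2 < p.1) with hS'
  have hsub : (ASet count).toFinset ⊆ S.image (fun p => p.1 + p.2) := by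
    intro x hx
    rw [List.mem_toFinset, mem_ASet] at hx
    obtain ⟨i, hi, j, hj, hij, rfl⟩ := hx
    rcases lt_or_gt_of_ne hij with h | h
    · exact Finset.mem_image.mpr ⟨(i, j), by
        simp [hS, Finset.mem_offDiag, hF, List.mem_toFinset, hi, hj, hij, h]⟩
    · exact Finset.mem_image.mpr ⟨(j, i), by
        simp only [hS, Finset.mem_filter, Finset.mem_offDiag, hF, List.mem_toFinset]
        exact ⟨⟨⟨hj, hi, hij.symm⟩, h⟩, by ring⟩⟩
  have h1 : (ASet count).length ≤ S.card := by
    calc (ASet count).length = (ASet count).toFinset.card :=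
          (List.toFinset_card_of_nodup (nodup_ASet count)).symm
      _ ≤ (S.image (fun p => p.1 + p.2)).card := Finset.card_le_card hsub
      _ ≤ S.card := Finset.card_image_le
  have hcard : S.card = S'.card := by
    apply Finset.card_bij (fun p _ => Prod.swap p)
    · intro p hp
      simp only [hS, hS', Finset.mem_filter, Finset.mem_offDiag, Prod.fst_swap, Prod.snd_swap] at hp ⊢
      tauto
    · intro p _ q _ h
      exact Prod.swap_injective h
    · intro p hp
      refine ⟨Prod.swap p, ?_, by simp⟩
      simp only [hS, hS', Finset.mem_filter, Finset.mem_offDiag, Prod.fst_swap, Prod.snd_swap] at hp ⊢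
      tauto
  have hdisj : Disjoint S S' := by
    rw [Finset.disjoint_left]
    intro p hp hp'
    simp only [hS, hS', Finset.mem_filter] at hp hp'
    exact absurd hp'.2 (not_lt.mpr (le_of_lt hp.2))
  have hunion : S ∪ S' ⊆ F.offDiag := by
    intro p hp
    rcases Finset.mem_union.mp hp with h | h
    · exact (Finset.mem_filter.mp h).1
    · exact (Finset.mem_filter.mp h).1
  have h2 : S.card + S'.card ≤ F.offDiag.card := by
    rw [← Finset.card_union_of_disjoint hdisj]
    exact Finset.card_le_card hunion
  have h3 : F.offDiag.card = F.card * F.card - F.card := Finset.offDiag_card F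
  have : F.card * F.card - F.card = F.card * (F.card - 1) := by
    cases F.card with
    | zero => simp
    | succ m => simp [Nat.succ_mul, Nat.mul_succ]
  omega

theorem not_nodup_length_two_le (count : List Int) (h : ¬ count.Nodup) : 2 ≤ count.length := by
  match count with
  | [] => exact absurd List.nodup_nil h
  | [a] => exact absurd (List.nodup_cons.mpr ⟨List.not_mem_nil, List.nodup_nil⟩) h
  | a :: b :: l => simp [List.length_cons]

theorem cast_mul_pred (N : Nat) : (N : Int) * ((N : Int) - 1) = ((N * (N - 1) : Nat) : Int) := by
  cases N with
  | zero => simp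
  | succ m => push_cast [Nat.succ_sub_one]; ring

theorem check_eq_check_alt (count : List Int) : check count = check_alt count := by
  rw [check_eq_ASet]
  unfold check_alt
  simp only [PySem.List.slice_from_one]
  set items := PySem.List.sorted count (fun x => x) false with hitems
  have hperm : items.Perm count := PySem.List.sorted_perm count (fun x => x) false
  have hpw : items.Pairwise (· ≤ ·) := PySem.List.sorted_pairwise count (fun x => x)
  have hN : items.length = count.length := hperm.length_eq
  by_cases hnd : count.Nodup
  · -- no duplicates: first guard passes
    have hndi : items.Nodup := hperm.nodup_iff.mpr hnd
    have hg1 : ((items.zip items.tail).any (fun p => p.1 == p.2)) = false :=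
      (any_zip_eq_false_iff items).mpr ((chain_ne_iff_nodup items hpw).mpr hndi)
    rw [hg1]
    simp only [Bool.false_eq_true, if_false]
    rw [sums_fold_eq items]
    set ss := PySem.List.sorted (sumsOf items) (fun x => x) false with hss
    have hsperm : ss.Perm (sumsOf items) := PySem.List.sorted_perm _ _ _
    have hspw : ss.Pairwise (· ≤ ·) := PySem.List.sorted_pairwise _ _
    -- the common cardinality: A's set has exactly the distinct i<j sums
    have hfin : (ASet count).toFinset = (sumsOf items).toFinset := by
      ext x
      simp only [List.mem_toFinset]
      rw [mem_ASet, mem_sumsOf]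
      have hmem : ∀ i : Int, i ∈ count ↔ i ∈ items := fun i => (hperm.mem_iff).symm
      constructor
      · rintro ⟨i, hi, j, hj, hij, rfl⟩
        exact (pairs_iff items hndi _).mp ⟨i, (hmem i).mp hi, j, (hmem j).mp hj, hij, rfl⟩
      · intro h
        obtain ⟨i, hi, j, hj, hij, rfl⟩ := (pairs_iff items hndi x).mpr h
        exact ⟨i, (hmem i).mpr hi, j, (hmem j).mpr hj, hij, rfl⟩
    have hA : (ASet count).length = (sumsOf items).dedup.length := by
      rw [← List.toFinset_card_of_nodup (nodup_ASet count), hfin, List.card_toFinset]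
    have hlen2 : (sumsOf items).length * 2 = count.length * (count.length - 1) := by
      rw [length_sumsOf_mul_two, hN]
    by_cases hsn : (sumsOf items).Nodup
    · have hg2 : ((ss.zip ss.tail).any (fun p => p.1 == p.2)) = false :=
        (any_zip_eq_false_iff ss).mpr ((chain_ne_iff_nodup ss hspw).mpr (hsperm.nodup_iff.mpr hsn))
      rw [hg2]
      simp only [Bool.false_eq_true, if_false]
      have : (ASet count).length * 2 = count.length * (count.length - 1) := by
        rw [hA, List.dedup_eq_self.mpr hsn, hlen2]
      rw [cast_mul_pred]
      simp only [decide_eq_true_eq]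
      · exact_mod_cast by rw [← this]
    · have hg2 : ((ss.zip ss.tail).any (fun p => p.1 == p.2)) = true := by
        rcases Bool.eq_false_or_eq_true ((ss.zip ss.tail).any (fun p => p.1 == p.2)) with h | h
        · exact h
        · exact absurd (hsperm.nodup_iff.mp ((chain_ne_iff_nodup ss hspw).mp
            ((any_zip_eq_false_iff ss).mp h))) hsn
      rw [hg2]
      simp only [if_true]
      have hlt : (ASet count).length * 2 < count.length * (count.length - 1) := by
        have hle := (List.dedup_sublist (sumsOf items)).length_le
        have hne : (sumsOf items).dedup.length ≠ (sumsOf items).length := by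
          intro h
          exact hsn (List.dedup_eq_self.mp ((List.dedup_sublist _).eq_of_length h))
        omega
      rw [cast_mul_pred]
      simp only [decide_eq_false_iff_not]
      intro h
      have : ((ASet count).length * 2 : Nat) = (count.length * (count.length - 1) : Nat) := by
        exact_mod_cast by push_cast at h ⊢; linarith
      omega
  · -- duplicates: first guard fires on B; A's sum count is short of n(n-1)/2
    have hndi : ¬ items.Nodup := fun h => hnd (hperm.nodup_iff.mp h)
    have hg1 : ((items.zip items.tail).any (fun p => p.1 == p.2)) = true := by
      rcases Bool.eq_false_or_eq_true ((items.zip items.tail).any (fun p => p.1 == p.2)) with h | h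
      · exact h
      · exact absurd ((chain_ne_iff_nodup items hpw).mp ((any_zip_eq_false_iff items).mp h)) hndi
    rw [hg1]
    simp only [if_true]
    simp only [decide_eq_false_iff_not]
    intro hEq
    have hb := ASet_card_bound count
    have hm : count.toFinset.card = count.dedup.length := List.card_toFinset count
    have hlt : count.dedup.length < count.length := by
      have hle := (List.dedup_sublist count).length_le
      rcases Nat.lt_or_ge count.dedup.length count.length with h | h
      · exact h
      · exact absurd (by rw [← (List.dedup_sublist count).eq_of_length (by omega)]; exact List.nodup_dedup count) hnd
    have hNn : 2 ≤ count.length := not_nodup_length_two_le count hnd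
    set m := count.toFinset.card with hmdef
    set N := count.length with hNdef
    have h4 : 2 * (ASet count).length < N * (N - 1) := by
      have h2 : m * (m - 1) ≤ (N - 1) * (N - 2) := Nat.mul_le_mul (by omega) (by omega)
      have h3 : (N - 1) * (N - 2) < N * (N - 1) := by
        calc (N - 1) * (N - 2) < (N - 1) * N := Nat.mul_lt_mul_of_pos_left (by omega) (by omega)
          _ = N * (N - 1) := Nat.mul_comm _ _
      omega
    rw [cast_mul_pred] at hEq
    have : ((ASet count).length * 2 : Nat) = (N * (N - 1) : Nat) := by
      exact_mod_cast by push_cast at hEq ⊢; linarith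
    omega

-- ===== VERDICT =====
theorem check_spec : Claim_equal_check := by
  intro count _
  unfold Spec_check
  exact check_eq_check_alt count
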